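-- pv_equiv track=rewrite | github.com/HassanImtiaz09/peakpulse-mobile-app | scripts/fetch-remaining-sides.py | extract_exercise_name
-- ===== SOURCE A (Python) =====
-- def extract_exercise_name(stem):
--     """Extract human-readable exercise name from stem."""
--     # Remove male- prefix and equipment prefix
--     parts = stem.replace("male-", "").split("-")
--     # Remove common equipment prefixes
--     equip = ["barbell", "bodyweight", "dumbbell", "dumbbells", "cable", "machine",
--              "bands", "band", "kettlebells", "kettlebell", "plyometrics", "trx", "cardio"]
--     words = []
--     skip_next = False
--     for p in parts:
--         if p.lower() in equip and not words:
--             continue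
--         if p == "side":
--             continue
--         words.append(p)
--     return " ".join(words)
-- ===== SOURCE B (Python) =====
-- EQUIP = frozenset(["barbell", "bodyweight", "dumbbell", "dumbbells", "cable", "machine",
--                    "bands", "band", "kettlebells", "kettlebell", "plyometrics", "trx", "cardio"])
--
--
-- def _skip_prefix(parts):
--     """Recursively drop the leading run of equipment (case-folded) or 'side' parts."""
--     if parts and (parts[0].lower() in EQUIP or parts[0] == "side"):
--         return _skip_prefix(parts[1:])
--     return parts
--
--
-- def _keep_words(parts):
--     """Recursively keep every part except exact 'side'."""
--     if not parts:
--         return []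
--     rest = _keep_words(parts[1:])
--     return rest if parts[0] == "side" else [parts[0]] + rest
--
--
-- def extract_exercise_name(stem):
--     """Extract human-readable exercise name from stem."""
--     parts = stem.replace("male-", "").split("-")
--     return " ".join(_keep_words(_skip_prefix(parts)))
-- ===== Notes on version B (the rewrite author's own statement) =====
-- stated objective: alternative
-- what changed: Replaces A's single flag-driven accumulator loop by a recursive two-phase decomposition: one recursion drops the leading equipment/'side' run, a second structural recursion rebuilds the tail without 'side' parts, then join.
import Mathlib
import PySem

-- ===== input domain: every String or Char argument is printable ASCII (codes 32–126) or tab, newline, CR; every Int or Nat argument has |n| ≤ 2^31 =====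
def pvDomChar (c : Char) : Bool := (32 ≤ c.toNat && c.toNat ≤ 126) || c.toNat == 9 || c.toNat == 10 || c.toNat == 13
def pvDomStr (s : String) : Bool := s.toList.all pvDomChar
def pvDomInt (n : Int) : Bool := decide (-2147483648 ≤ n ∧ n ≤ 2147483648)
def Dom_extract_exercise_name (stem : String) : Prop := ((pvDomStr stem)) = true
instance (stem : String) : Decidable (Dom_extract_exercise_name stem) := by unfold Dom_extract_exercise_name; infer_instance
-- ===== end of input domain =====

-- B replaces A's flag-driven accumulator loop by a recursive two-phase decomposition
-- (drop the leading equipment/"side" run, then rebuild the tail without "side"); objective: alternative, same cost.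

-- ===== PORT A =====
-- equip = ["barbell", …]  (A's list literal)
def pvEquipA : List String :=
  ["barbell", "bodyweight", "dumbbell", "dumbbells", "cable", "machine",
   "bands", "band", "kettlebells", "kettlebell", "plyometrics", "trx", "cardio"]

-- the body of A's 'for p in parts' loop over the accumulator 'words' (skip_next in A is dead code)
def pvStepA (words : List String) (p : String) : List String :=
  if pvEquipA.contains (PySem.Str.lower p) && words.isEmpty then words
  else if p == "side" then words
  else words ++ [p]

def extract_exercise_name (stem : String) : String :=
  let parts := (PySem.Str.split? (PySem.Str.replace stem "male-" "") "-").getD []  -- sep "-" ≠ "": never none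
  let words := parts.foldl pvStepA []
  PySem.Str.join " " words

-- ===== PORT B =====
-- EQUIP = frozenset({"barbell", …})  (B's set literal)
def pvEquipB : PySem.Set String :=
  PySem.Set.ofList
    ["barbell", "bodyweight", "dumbbell", "dumbbells", "cable", "machine",
     "bands", "band", "kettlebells", "kettlebell", "plyometrics", "trx", "cardio"]

-- B's _skip_prefix: recursively drop the leading equipment/"side" run
def pvSkipPrefixB : List String → List String
  | [] => []
  | p :: rest =>
      if pvEquipB.contains (PySem.Str.lower p) || p == "side" then pvSkipPrefixB rest
      else p :: rest

-- B's _keep_words: structural recursion keeping every part except exact "side"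
def pvKeepWordsB : List String → List String
  | [] => []
  | p :: rest =>
      let r := pvKeepWordsB rest
      if p == "side" then r else p :: r

def extract_exercise_name_alt (stem : String) : String :=
  let parts := (PySem.Str.split? (PySem.Str.replace stem "male-" "") "-").getD []  -- sep "-" ≠ "": never none
  PySem.Str.join " " (pvKeepWordsB (pvSkipPrefixB parts))

-- ===== PRECONDITION & SPEC =====
def Spec_extract_exercise_name (stem : String) (out : String) : Prop := out = extract_exercise_name_alt stem
instance (stem : String) (out : String) : Decidable (Spec_extract_exercise_name stem out) := by unfold Spec_extract_exercise_name; infer_instance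

-- ===== CLAIM (what is proved, stated in full; the proofs are below) =====
def Claim_equal_extract_exercise_name : Prop := ∀ (stem : String), Dom_extract_exercise_name stem → Spec_extract_exercise_name stem (extract_exercise_name stem)

-- ===== LEMMAS AND PROOFS =====

-- B's set literal has no duplicates, so membership in it is membership in A's list
theorem pvEquipB_eq : pvEquipB = (pvEquipA : List String) := by decide

-- once 'words' is nonempty, A's equipment branch is dead: the loop appends exactly B's phase-2 result
theorem pvLoopA_of_ne_nil (parts : List String) :
    ∀ acc : List String, acc ≠ [] →
      parts.foldl pvStepA acc = acc ++ pvKeepWordsB parts := by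
  induction parts with
  | nil => intro acc _; simp [pvKeepWordsB]
  | cons p rest ih =>
    intro acc hacc
    simp only [List.foldl_cons, pvStepA, List.isEmpty_eq_false_iff.mpr hacc, Bool.and_false,
      pvKeepWordsB]
    by_cases hside : p = "side"
    · simp [hside, ih acc hacc]
    · simp [hside, ih (acc ++ [p]) (by simp)]

-- A's loop from the empty accumulator = B's skip-then-keep recursion pair
theorem pvLoopA_nil (parts : List String) :
    parts.foldl pvStepA [] = pvKeepWordsB (pvSkipPrefixB parts) := by
  induction parts with
  | nil => rfl
  | cons p rest ih =>
    by_cases he : PySem.Str.lower p ∈ pvEquipA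
    · -- equipment head: both sides drop it
      have hstep : pvStepA [] p = [] := by simp [pvStepA, he]
      have hskip : pvSkipPrefixB (p :: rest) = pvSkipPrefixB rest := by
        simp [pvSkipPrefixB, pvEquipB_eq, he]
      rw [List.foldl_cons, hstep, ih, hskip]
    · by_cases hs : p = "side"
      · -- "side" head: both sides drop it
        have hstep : pvStepA [] p = [] := by simp [pvStepA, hs]
        have hskip : pvSkipPrefixB (p :: rest) = pvSkipPrefixB rest := by
          simp [pvSkipPrefixB, hs]
        rw [List.foldl_cons, hstep, ih, hskip]
      · -- ordinary head: B's skip stops, keep retains the head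
        have hstep : pvStepA [] p = [p] := by simp [pvStepA, he, hs]
        have hskip : pvSkipPrefixB (p :: rest) = p :: rest := by
          simp [pvSkipPrefixB, pvEquipB_eq, he, hs]
        rw [List.foldl_cons, hstep, pvLoopA_of_ne_nil rest [p] (by simp), hskip]
        simp [pvKeepWordsB, hs]

-- ===== VERDICT (by name: the statement is the Claim_ definition above) =====
theorem extract_exercise_name_spec : Claim_equal_extract_exercise_name := by
  intro stem _
  unfold Spec_extract_exercise_name extract_exercise_name extract_exercise_name_alt
  simp only [pvLoopA_nil]
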